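-- pv_equiv track=rewrite | github.com/JulioHC00/cmesrc | src/scripts/pre-processing/fill_swan_missing_positions.py | get_nan_intervals
-- ===== SOURCE A (Python) =====
-- def get_nan_intervals(nan_bbox_mask):
--     """
--     Identify intervals in the nan_bbox_mask where NaN values occur.
--
--     Parameters:
--     nan_bbox_mask (array-like): A mask indicating where bounding box data is NaN.
--
--     Yields:
--     tuple: A tuple containing the start and end indices of each interval where NaN values occur.
--     """
--     start = None
--     end = None
--
--     for i, value in enumerate(nan_bbox_mask):
--         if value and start is None:
--             start = i
--
--         elif not value and start is not None:
--             end = i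
--
--             yield start, end
--
--             start = None
--             end = None
--
--         if i == len(nan_bbox_mask) - 1 and start is not None:
--             end = i + 1
--
--             yield start, end
--
--             start = None
--             end = None
-- ===== SOURCE B (Python) =====
-- from itertools import groupby
--
--
-- def get_nan_intervals(nan_bbox_mask):
--     for key, group in groupby(enumerate(nan_bbox_mask), key=lambda p: bool(p[1])):
--         if key:
--             indices = [i for i, _ in group]
--             yield indices[0], indices[-1] + 1
-- ===== Notes on version B (the rewrite author's own statement) =====
-- stated objective: idiomatic
-- what changed: Replaces the manual start/end state machine (with a special last-index check inside the loop) by itertools.groupby over enumerate, yielding (first, last+1) for each truthy run.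
import Mathlib
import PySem

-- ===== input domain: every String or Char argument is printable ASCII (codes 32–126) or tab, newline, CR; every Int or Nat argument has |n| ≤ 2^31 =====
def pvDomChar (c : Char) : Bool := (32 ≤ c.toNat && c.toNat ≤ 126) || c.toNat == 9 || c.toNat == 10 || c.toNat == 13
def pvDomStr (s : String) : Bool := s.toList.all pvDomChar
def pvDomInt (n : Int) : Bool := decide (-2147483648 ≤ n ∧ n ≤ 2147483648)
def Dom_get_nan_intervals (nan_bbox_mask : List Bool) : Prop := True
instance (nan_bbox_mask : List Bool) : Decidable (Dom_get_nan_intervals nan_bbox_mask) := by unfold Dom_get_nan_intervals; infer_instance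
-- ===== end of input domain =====

-- ===== PORT A =====
-- Both ports are faithful transliterations; header: B groups runs instead of A's per-element state machine (same O(n) cost).
-- A's loop: state machine with `start : Option Int`; the in-loop last-index check is `i = last`.
def pvAuxA (last : Int) (i : Int) (s : Option Int) : List Bool → List (Int × Int)
  | [] => []
  | v :: rest =>
    let p1 : List (Int × Int) × Option Int :=
      match s, v with
      | none, true => ([], some i)          -- if value and start is None
      | some st, false => ([(st, i)], none) -- elif not value and start is not None
      | _, _ => ([], s)
    let p2 : List (Int × Int) × Option Int :=
      if i = last then                      -- if i == len(mask) - 1 and start is not None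
        match p1.2 with
        | some st => ([(st, i + 1)], none)
        | none => ([], none)
      else ([], p1.2)
    p1.1 ++ p2.1 ++ pvAuxA last (i + 1) p2.2 rest

def get_nan_intervals (nan_bbox_mask : List Bool) : List (Int × Int) :=
  pvAuxA ((nan_bbox_mask.length : Int) - 1) 0 none nan_bbox_mask

-- ===== PORT B =====
-- B: group maximal same-value runs (itertools.groupby over enumerate); yield (first, last+1) of truthy runs.
def pvAuxB (i : Int) : List Bool → List (Int × Int)
  | [] => []
  | v :: rest =>
    let run := rest.takeWhile (· == v)
    let rest' := rest.dropWhile (· == v)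
    let j := i + 1 + (run.length : Int)
    if v then (i, j) :: pvAuxB j rest' else pvAuxB j rest'
  termination_by l => l.length
  decreasing_by
    all_goals
      simp only [List.length_cons]
      exact Nat.lt_succ_of_le (List.length_dropWhile_le _ _)

def get_nan_intervals_alt (nan_bbox_mask : List Bool) : List (Int × Int) :=
  pvAuxB 0 nan_bbox_mask

-- ===== PRECONDITION & SPEC =====
def Spec_get_nan_intervals (nan_bbox_mask : List Bool) (out : List (Int × Int)) : Prop := out = get_nan_intervals_alt nan_bbox_mask
instance (nan_bbox_mask : List Bool) (out : List (Int × Int)) : Decidable (Spec_get_nan_intervals nan_bbox_mask out) := by unfold Spec_get_nan_intervals; infer_instance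

-- ===== CLAIM (what is proved, stated in full; the proofs are below) =====
def Claim_equal_get_nan_intervals : Prop := ∀ (nan_bbox_mask : List Bool), Dom_get_nan_intervals nan_bbox_mask → Spec_get_nan_intervals nan_bbox_mask (get_nan_intervals nan_bbox_mask)

-- ===== LEMMAS AND PROOFS =====

-- skipping one false is the same for B whether or not more falses follow
lemma pvAuxB_false (i : Int) (rest : List Bool) :
    pvAuxB i (false :: rest) = pvAuxB (i + 1) rest := by
  cases rest with
  | nil => simp [pvAuxB]
  | cons w r =>
    cases w with
    | false => simp [pvAuxB, List.takeWhile, List.dropWhile]; ring_nf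
    | true => simp [pvAuxB, List.takeWhile, List.dropWhile]

-- A's loop while start = some st: emits (st, i + length of leading true run), then resumes with none
lemma pvAuxA_some (last : Int) :
    ∀ (l : List Bool) (i st : Int), i + (l.length : Int) = last + 1 → l ≠ [] →
      pvAuxA last i (some st) l =
        (st, i + ((l.takeWhile (· == true)).length : Int)) ::
          (match l.dropWhile (· == true) with
           | [] => []
           | _ :: d => pvAuxA last (i + ((l.takeWhile (· == true)).length : Int) + 1) none d) := by
  intro l
  induction l with
  | nil => intro i st _ h; exact absurd rfl h
  | cons v rest ih =>
    intro i st hinv _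
    cases v with
    | false =>
      simp [pvAuxA, List.takeWhile, List.dropWhile]
    | true =>
      cases rest with
      | nil =>
        have hlast : i = last := by
          simp only [List.length_cons, List.length_nil] at hinv; push_cast at hinv; omega
        simp [pvAuxA, hlast, List.takeWhile, List.dropWhile]
      | cons w r =>
        have hne : ¬ i = last := by
          simp only [List.length_cons] at hinv; push_cast at hinv; omega
        have hinv' : (i + 1) + (((w :: r).length : Nat) : Int) = last + 1 := by
          simp only [List.length_cons] at hinv ⊢; push_cast at hinv ⊢; omega
        rw [show pvAuxA last i (some st) (true :: w :: r) =
              pvAuxA last (i + 1) (some st) (w :: r) by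
          simp [pvAuxA, hne]]
        rw [List.takeWhile_cons_of_pos (p := (· == true)) (l := w :: r) (by simp),
            List.dropWhile_cons_of_pos (p := (· == true)) (l := w :: r) (by simp)]
        rw [ih (i + 1) st hinv' (by simp)]
        simp only [List.length_cons]
        push_cast
        have h2 : i + ((((w :: r).takeWhile (· == true)).length : Int) + 1)
            = i + 1 + (((w :: r).takeWhile (· == true)).length : Int) := by ring
        rw [h2]

-- main: A's loop from state none equals B's run grouping
lemma pvAux_main (last : Int) :
    ∀ (n : Nat) (l : List Bool) (i : Int), l.length = n →
      i + (l.length : Int) = last + 1 →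
      pvAuxA last i none l = pvAuxB i l := by
  intro n
  induction n using Nat.strong_induction_on with
  | _ n ih =>
    intro l i hlen hinv
    cases l with
    | nil => simp [pvAuxA, pvAuxB]
    | cons v rest =>
      cases v with
      | false =>
        rw [pvAuxB_false]
        have h1 : pvAuxA last i none (false :: rest) = pvAuxA last (i + 1) none rest := by
          by_cases hil : i = last <;> simp [pvAuxA, hil]
        rw [h1]
        exact ih rest.length (by simp at hlen; omega) rest (i + 1) rfl
          (by simp only [List.length_cons] at hinv; push_cast at hinv; omega)
      | true =>
        cases rest with
        | nil =>
          have hlast : i = last := by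
            simp only [List.length_cons, List.length_nil] at hinv; push_cast at hinv; omega
          simp [pvAuxA, pvAuxB, hlast]
        | cons w r =>
          have hne : ¬ i = last := by
            simp only [List.length_cons] at hinv; push_cast at hinv; omega
          have hinv' : (i + 1) + (((w :: r).length : Nat) : Int) = last + 1 := by
            simp only [List.length_cons] at hinv ⊢; push_cast at hinv ⊢; omega
          rw [show pvAuxA last i none (true :: w :: r) =
                pvAuxA last (i + 1) (some i) (w :: r) by simp [pvAuxA, hne]]
          rw [pvAuxA_some last (w :: r) (i + 1) i hinv' (by simp)]
          rw [show pvAuxB i (true :: w :: r) =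
                (i, i + 1 + (((w :: r).takeWhile (· == true)).length : Int)) ::
                  pvAuxB (i + 1 + (((w :: r).takeWhile (· == true)).length : Int))
                    ((w :: r).dropWhile (· == true)) by simp [pvAuxB]]
          have hsplit : ((w :: r).takeWhile (· == true)).length +
              ((w :: r).dropWhile (· == true)).length = (w :: r).length := by
            rw [← List.length_append, List.takeWhile_append_dropWhile]
          cases hd : (w :: r).dropWhile (· == true) with
          | nil =>
            simp [pvAuxB]
          | cons x d =>
            cases x with
            | true =>
              exfalso
              have hh := List.head?_dropWhile_not (· == true) (w :: r)
              rw [hd] at hh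
              simp at hh
            | false =>
              rw [pvAuxB_false]
              have hdl : d.length < n := by
                rw [hd] at hsplit
                simp only [List.length_cons] at hsplit hlen
                omega
              have heq := ih d.length hdl d
                (i + 1 + (((w :: r).takeWhile (· == true)).length : Int) + 1) rfl
                (by
                  rw [hd] at hsplit
                  simp only [List.length_cons] at hsplit hinv
                  push_cast at hinv ⊢
                  omega)
              exact congrArg _ heq

-- ===== VERDICT (by name: the statement is the Claim_ definition above) =====
theorem get_nan_intervals_spec : Claim_equal_get_nan_intervals := by
  intro mask _
  unfold Spec_get_nan_intervals get_nan_intervals get_nan_intervals_alt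
  exact pvAux_main ((mask.length : Int) - 1) mask.length mask 0 rfl (by omega)
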